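-- pv_equiv track=rewrite | github.com/Jordan231111/CodeForce-Solutions | debug_e2.py | debug_solve_case
-- ===== SOURCE A (Python) =====
-- def debug_solve_case(n, a, b):
--     # Check for empty arrays
--     if n == 0:
--         return 0
--
--     # 1. No-deletion case
--     best_no_del = 0
--     for i in range(n):
--         if a[i] == b[i]:
--             best_no_del = max(best_no_del, i + 1)
--     for i in range(n - 1):
--         if a[i] == a[i + 1] or b[i] == b[i + 1]:
--             best_no_del = max(best_no_del, i + 1)
--
--     # 2. Single-deletion case
--     seen_a = set()
--     seen_b = set()
--     best_with_del = 0
--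
--     for j in range(n - 2, -1, -1):  # start from n-2 down to 0
--         if (a[j] in seen_a) or (a[j] in seen_b) or (b[j] in seen_a) or (b[j] in seen_b):
--             best_with_del = max(best_with_del, j + 1)  # prefix length = j+1
--
--         # add the pair at index j+1 to the seen sets
--         seen_a.add(a[j + 1])
--         seen_b.add(b[j + 1])
--
--     return max(best_no_del, best_with_del)
-- ===== SOURCE B (Python) =====
-- def debug_solve_case(n, a, b):
--     # last column at which each value occurs in either array
--     maxcol = {}
--     for i in range(n):
--         maxcol[a[i]] = i
--         maxcol[b[i]] = i
--     # scan columns from the right: the first (largest) achievable column i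
--     # gives the answer i + 1 directly, so no running maximum is needed
--     for i in range(n - 1, -1, -1):
--         if a[i] == b[i]:
--             return i + 1
--         if i + 1 < n and (a[i] == a[i + 1] or b[i] == b[i + 1]):
--             return i + 1
--         if maxcol.get(a[i], -1) >= i + 2 or maxcol.get(b[i], -1) >= i + 2:
--             return i + 1
--     return 0
-- ===== Notes on version B (the rewrite author's own statement) =====
-- stated objective: alternative
-- what changed: B drops A's three accumulating passes (two forward running-max loops plus a backward loop maintaining two growing seen-sets): it builds a last-occurrence table of each value in one forward pass and then scans columns from the right, returning i+1 at the first (largest) achievable column, so no running maximum and no seen-sets exist at all.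
import Mathlib
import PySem

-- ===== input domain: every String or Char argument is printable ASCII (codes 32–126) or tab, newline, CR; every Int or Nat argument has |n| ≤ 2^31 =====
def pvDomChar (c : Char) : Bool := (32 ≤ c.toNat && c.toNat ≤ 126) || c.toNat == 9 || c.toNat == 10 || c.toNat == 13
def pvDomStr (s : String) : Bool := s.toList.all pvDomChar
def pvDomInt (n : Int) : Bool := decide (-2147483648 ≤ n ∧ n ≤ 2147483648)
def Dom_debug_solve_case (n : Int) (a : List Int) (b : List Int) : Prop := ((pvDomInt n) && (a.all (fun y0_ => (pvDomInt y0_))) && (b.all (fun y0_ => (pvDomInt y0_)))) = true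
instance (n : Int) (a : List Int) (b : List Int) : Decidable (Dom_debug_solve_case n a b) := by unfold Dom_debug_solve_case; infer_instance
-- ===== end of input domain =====

-- B replaces A's three accumulating passes (two forward running-max loops and a backward
-- seen-set loop) by a last-occurrence table plus a single right-to-left first-hit scan.

-- ===== PORT A =====
def debug_solve_case (n : Int) (a : List Int) (b : List Int) : Int :=
  if n = 0 then 0
  else
    let best_no_del : Int :=
      (PySem.List.pyRange 0 n 1).foldl
        (fun best i =>
          if PySem.List.pyGetD a i 0 = PySem.List.pyGetD b i 0 then max best (i + 1) else best) 0
    let best_no_del :=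
      (PySem.List.pyRange 0 (n - 1) 1).foldl
        (fun best i =>
          if (PySem.List.pyGetD a i 0 = PySem.List.pyGetD a (i + 1) 0 ∨
              PySem.List.pyGetD b i 0 = PySem.List.pyGetD b (i + 1) 0)
          then max best (i + 1) else best) best_no_del
    let st :=
      (PySem.List.pyRange (n - 2) (-1) (-1)).foldl
        (fun (st : PySem.Set Int × PySem.Set Int × Int) j =>
          let seen_a := st.1
          let seen_b := st.2.1
          let best := st.2.2
          let best :=
            if (seen_a.contains (PySem.List.pyGetD a j 0) || seen_b.contains (PySem.List.pyGetD a j 0) ||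
                seen_a.contains (PySem.List.pyGetD b j 0) || seen_b.contains (PySem.List.pyGetD b j 0))
            then max best (j + 1) else best
          (seen_a.add (PySem.List.pyGetD a (j + 1) 0), seen_b.add (PySem.List.pyGetD b (j + 1) 0), best))
        (PySem.Set.empty, PySem.Set.empty, 0)
    max best_no_del st.2.2

-- ===== PORT B =====
def debug_solve_case_alt (n : Int) (a : List Int) (b : List Int) : Int :=
  let maxcol :=
    (PySem.List.pyRange 0 n 1).foldl
      (fun (d : PySem.Dict Int Int) i =>
        (d.insert (PySem.List.pyGetD a i 0) i).insert (PySem.List.pyGetD b i 0) i)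
      PySem.Dict.empty
  -- the three early-return ifs of B's backward loop, as one short-circuit condition
  match (PySem.List.pyRange (n - 1) (-1) (-1)).find? (fun i =>
      decide (PySem.List.pyGetD a i 0 = PySem.List.pyGetD b i 0) ||
      (decide (i + 1 < n) &&
        (decide (PySem.List.pyGetD a i 0 = PySem.List.pyGetD a (i + 1) 0) ||
         decide (PySem.List.pyGetD b i 0 = PySem.List.pyGetD b (i + 1) 0))) ||
      (decide (maxcol.getD (PySem.List.pyGetD a i 0) (-1) ≥ i + 2) ||
       decide (maxcol.getD (PySem.List.pyGetD b i 0) (-1) ≥ i + 2))) with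
  | some i => i + 1
  | none => 0

-- ===== PRECONDITION & SPEC =====
-- Pre_ excludes exactly the inputs on which the Python A raises IndexError (n larger than a list's length).
def Pre_debug_solve_case (n : Int) (a : List Int) (b : List Int) : Prop :=
  n ≤ (a.length : Int) ∧ n ≤ (b.length : Int)
instance (n : Int) (a : List Int) (b : List Int) : Decidable (Pre_debug_solve_case n a b) := by
  unfold Pre_debug_solve_case; infer_instance
def pvWitness_debug_solve_case : Int × List Int × List Int := (3, [1, 2, 1], [4, 5, 6])
def Spec_debug_solve_case (n : Int) (a : List Int) (b : List Int) (out : Int) : Prop := out = debug_solve_case_alt n a b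
instance (n : Int) (a : List Int) (b : List Int) (out : Int) : Decidable (Spec_debug_solve_case n a b out) := by unfold Spec_debug_solve_case; infer_instance

-- ===== CLAIM (what is proved, stated in full; the proofs are below) =====
def Claim_equal_debug_solve_case : Prop := ∀ (n : Int) (a : List Int) (b : List Int), Dom_debug_solve_case n a b → Pre_debug_solve_case n a b → Spec_debug_solve_case n a b (debug_solve_case n a b)

-- ===== LEMMAS AND PROOFS =====

-- proof-side names for pieces of the two ports (each definitionally equal to its port's code)
def pvB2 (n : Int) (a b : List Int) : Int :=
  (PySem.List.pyRange 0 (n - 1) 1).foldl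
    (fun best i =>
      if (PySem.List.pyGetD a i 0 = PySem.List.pyGetD a (i + 1) 0 ∨
          PySem.List.pyGetD b i 0 = PySem.List.pyGetD b (i + 1) 0)
      then max best (i + 1) else best)
    ((PySem.List.pyRange 0 n 1).foldl
      (fun best i =>
        if PySem.List.pyGetD a i 0 = PySem.List.pyGetD b i 0 then max best (i + 1) else best) 0)

def pvStepA (a b : List Int) (st : PySem.Set Int × PySem.Set Int × Int) (j : Int) :
    PySem.Set Int × PySem.Set Int × Int :=
  (st.1.add (PySem.List.pyGetD a (j + 1) 0), st.2.1.add (PySem.List.pyGetD b (j + 1) 0),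
   if (st.1.contains (PySem.List.pyGetD a j 0) || st.2.1.contains (PySem.List.pyGetD a j 0) ||
       st.1.contains (PySem.List.pyGetD b j 0) || st.2.1.contains (PySem.List.pyGetD b j 0))
   then max st.2.2 (j + 1) else st.2.2)

def pvMaxcol (n : Int) (a b : List Int) : PySem.Dict Int Int :=
  (PySem.List.pyRange 0 n 1).foldl
    (fun (d : PySem.Dict Int Int) i =>
      (d.insert (PySem.List.pyGetD a i 0) i).insert (PySem.List.pyGetD b i 0) i)
    PySem.Dict.empty

def pvStepB (n : Int) (a b : List Int) (best j : Int) : Int :=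
  if ((pvMaxcol n a b).getD (PySem.List.pyGetD a j 0) (-1) ≥ j + 2 ∨
      (pvMaxcol n a b).getD (PySem.List.pyGetD b j 0) (-1) ≥ j + 2)
  then max best (j + 1) else best

-- "greatest achievable column" scan: first i < m from the top with p i, plus one (0 if none)
def pvG (p : Int → Prop) [DecidablePred p] : Nat → Int
  | 0 => 0
  | Nat.succ m => if p (m : Int) then (m : Int) + 1 else pvG p m

lemma pvG_nonneg (p : Int → Prop) [DecidablePred p] (m : Nat) : 0 ≤ pvG p m := by
  induction m with
  | zero => simp [pvG]
  | succ i ih =>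
    simp only [pvG]
    split_ifs
    · positivity
    · exact ih

lemma pvG_le (p : Int → Prop) [DecidablePred p] (m : Nat) : pvG p m ≤ (m : Int) := by
  induction m with
  | zero => simp [pvG]
  | succ i ih =>
    simp only [pvG]
    split_ifs
    · push_cast; omega
    · push_cast; omega

lemma pvG_congr (p p' : Int → Prop) [DecidablePred p] [DecidablePred p'] (m : Nat)
    (h : ∀ i : Nat, i < m → (p (i : Int) ↔ p' (i : Int))) : pvG p m = pvG p' m := by
  induction m with
  | zero => rfl
  | succ i ih =>
    simp only [pvG]
    rw [if_congr (h i (Nat.lt_succ_self i)) rfl rfl,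
        ih (fun k hk => h k (Nat.lt_succ_of_lt hk))]

lemma pvG_or (p q : Int → Prop) [DecidablePred p] [DecidablePred q] (m : Nat) :
    pvG (fun i => p i ∨ q i) m = max (pvG p m) (pvG q m) := by
  induction m with
  | zero => simp [pvG]
  | succ i ih =>
    have h1 := pvG_le p i
    have h2 := pvG_le q i
    have h3 := pvG_nonneg p i
    have h4 := pvG_nonneg q i
    by_cases hp : p (i : Int) <;> by_cases hq : q (i : Int) <;>
      simp [pvG, ih, hp, hq] <;> omega

-- a forward running-max fold equals pvG
lemma pv_fold_G (p : Int → Prop) [DecidablePred p] (m : Nat) (x : Int) (hx : 0 ≤ x) :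
    (PySem.List.pyRange 0 (m : Int) 1).foldl
      (fun best i => if p i then max best (i + 1) else best) x = max x (pvG p m) := by
  induction m with
  | zero =>
    rw [Nat.cast_zero, PySem.List.pyRange_one_eq_nil (le_refl (0 : Int))]
    simp only [List.foldl_nil, pvG]
    omega
  | succ i ih =>
    have hle := pvG_le p i
    rw [show ((i + 1 : Nat) : Int) = (i : Int) + 1 by push_cast; ring,
        PySem.List.pyRange_one_succ_right (Int.natCast_nonneg i), List.foldl_append]
    simp only [List.foldl_cons, List.foldl_nil, ih, pvG]
    split_ifs <;> omega

-- B's first-hit backward scan equals pvG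
lemma pv_find_G (pb : Int → Bool) (m : Nat) :
    (match (PySem.List.pyRange ((m : Int) - 1) (-1) (-1)).find? pb with
     | some i => i + 1
     | none => (0 : Int)) = pvG (fun i => pb i = true) m := by
  induction m with
  | zero =>
    rw [Nat.cast_zero, show (0 : Int) - 1 = -1 by ring,
        PySem.List.pyRange_neg_one_eq_nil (le_refl (-1 : Int))]
    rfl
  | succ i ih =>
    rw [show ((i + 1 : Nat) : Int) - 1 = (i : Int) by push_cast; ring,
        PySem.List.pyRange_neg_one_cons (by omega : (-1 : Int) < (i : Int))]
    simp only [List.find?_cons, pvG]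
    by_cases h : pb (i : Int) = true
    · rw [if_pos h]; simp [h]
    · rw [if_neg h]
      simp only [Bool.not_eq_true] at h
      simpa [h] using ih

-- generic facts about folds whose step keeps a running max
lemma pv_foldl_comm (g : Int → Int → Int) (H : ∀ x i j, g (g x i) j = g (g x j) i) :
    ∀ (l : List Int) (x c : Int), l.foldl g (g x c) = g (l.foldl g x) c := by
  intro l
  induction l with
  | nil => intro x c; simp
  | cons y l ih => intro x c; simp only [List.foldl_cons]; rw [H, ih]

lemma pv_foldl_reverse (g : Int → Int → Int) (H : ∀ x i j, g (g x i) j = g (g x j) i) :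
    ∀ (l : List Int) (x : Int), l.reverse.foldl g x = l.foldl g x := by
  intro l
  induction l with
  | nil => intro x; simp
  | cons y l ih =>
    intro x
    rw [List.reverse_cons, List.foldl_append]
    simp only [List.foldl_cons, List.foldl_nil]
    rw [ih, ← pv_foldl_comm g H]

lemma pv_stepB_comm (n : Int) (a b : List Int) :
    ∀ x i j, pvStepB n a b (pvStepB n a b x i) j = pvStepB n a b (pvStepB n a b x j) i := by
  intro x i j
  unfold pvStepB
  split_ifs <;> first | rfl | exact max_right_comm x (i + 1) (j + 1)

lemma pv_contains_iff (s : PySem.Set Int) (v : Int) : (s.contains v = true) ↔ v ∈ s := by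
  simp [PySem.Set.contains]

lemma pvMaxcol_zero (a b : List Int) : pvMaxcol ((0 : Nat) : Int) a b = PySem.Dict.empty := by
  unfold pvMaxcol
  rw [Nat.cast_zero, PySem.List.pyRange_one_eq_nil (le_refl (0 : Int))]
  rfl

lemma pvMaxcol_succ (a b : List Int) (i : Nat) :
    pvMaxcol ((i + 1 : Nat) : Int) a b =
      ((pvMaxcol (i : Int) a b).insert (PySem.List.pyGetD a (i : Int) 0) (i : Int)).insert
        (PySem.List.pyGetD b (i : Int) 0) (i : Int) := by
  unfold pvMaxcol
  rw [show ((i + 1 : Nat) : Int) = (i : Int) + 1 by push_cast; ring]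
  rw [PySem.List.pyRange_one_succ_right (Int.natCast_nonneg i)]
  rw [List.foldl_append]
  simp only [List.foldl_cons, List.foldl_nil]

-- the last-occurrence table answers "does the value occur at a column ≥ t?"
lemma pv_mc (a b : List Int) :
    ∀ (m : Nat) (v t : Int), 0 ≤ t →
      (((pvMaxcol (m : Int) a b).getD v (-1) ≥ t) ↔
        ∃ k : Int, t ≤ k ∧ k < (m : Int) ∧
          (PySem.List.pyGetD a k 0 = v ∨ PySem.List.pyGetD b k 0 = v)) := by
  intro m
  induction m with
  | zero =>
    intro v t ht
    rw [pvMaxcol_zero, PySem.Dict.getD_empty]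
    constructor
    · intro h; exact absurd h (by omega)
    · rintro ⟨k, h1, h2, -⟩; exact absurd h1 (by push_cast at h2 ⊢; omega)
  | succ i ih =>
    intro v t ht
    rw [pvMaxcol_succ a b i, PySem.Dict.getD_insert, PySem.Dict.getD_insert]
    by_cases h1 : v = PySem.List.pyGetD b (i : Int) 0
    · rw [if_pos h1]
      constructor
      · intro h; exact ⟨(i : Int), by omega, by push_cast; omega, Or.inr h1.symm⟩
      · rintro ⟨k, hk1, hk2, -⟩; push_cast at hk2; omega
    · rw [if_neg h1]
      by_cases h2 : v = PySem.List.pyGetD a (i : Int) 0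
      · rw [if_pos h2]
        constructor
        · intro h; exact ⟨(i : Int), by omega, by push_cast; omega, Or.inl h2.symm⟩
        · rintro ⟨k, hk1, hk2, -⟩; push_cast at hk2; omega
      · rw [if_neg h2, ih v t ht]
        constructor
        · rintro ⟨k, hk1, hk2, hk3⟩; exact ⟨k, hk1, by push_cast; omega, hk3⟩
        · rintro ⟨k, hk1, hk2, hk3⟩
          refine ⟨k, hk1, ?_, hk3⟩
          by_cases hk : k = (i : Int)
          · subst hk
            rcases hk3 with h | h
            · exact absurd h.symm h2
            · exact absurd h.symm h1
          · push_cast at hk2; omega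

-- the membership test of A's backward loop equals the table test (under the loop invariant)
lemma pv_cond (a b : List Int) (m : Nat) (j : Int) (hj0 : 0 ≤ j) (sa sb : PySem.Set Int)
    (hsa : ∀ v : Int, v ∈ sa ↔ ∃ k : Int, j + 2 ≤ k ∧ k < (m : Int) ∧ PySem.List.pyGetD a k 0 = v)
    (hsb : ∀ v : Int, v ∈ sb ↔ ∃ k : Int, j + 2 ≤ k ∧ k < (m : Int) ∧ PySem.List.pyGetD b k 0 = v) :
    ((sa.contains (PySem.List.pyGetD a j 0) || sb.contains (PySem.List.pyGetD a j 0) ||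
      sa.contains (PySem.List.pyGetD b j 0) || sb.contains (PySem.List.pyGetD b j 0)) = true)
    ↔ ((pvMaxcol (m : Int) a b).getD (PySem.List.pyGetD a j 0) (-1) ≥ j + 2 ∨
       (pvMaxcol (m : Int) a b).getD (PySem.List.pyGetD b j 0) (-1) ≥ j + 2) := by
  have e1 : ∀ w : Int,
      ((∃ k : Int, j + 2 ≤ k ∧ k < (m : Int) ∧ PySem.List.pyGetD a k 0 = w) ∨
       (∃ k : Int, j + 2 ≤ k ∧ k < (m : Int) ∧ PySem.List.pyGetD b k 0 = w)) ↔
      (∃ k : Int, j + 2 ≤ k ∧ k < (m : Int) ∧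
        (PySem.List.pyGetD a k 0 = w ∨ PySem.List.pyGetD b k 0 = w)) := by
    intro w
    constructor
    · rintro (⟨k, h1, h2, h3⟩ | ⟨k, h1, h2, h3⟩)
      exacts [⟨k, h1, h2, Or.inl h3⟩, ⟨k, h1, h2, Or.inr h3⟩]
    · rintro ⟨k, h1, h2, h3 | h3⟩
      exacts [Or.inl ⟨k, h1, h2, h3⟩, Or.inr ⟨k, h1, h2, h3⟩]
  rw [pv_mc a b m (PySem.List.pyGetD a j 0) (j + 2) (by omega),
      pv_mc a b m (PySem.List.pyGetD b j 0) (j + 2) (by omega),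
      ← e1 (PySem.List.pyGetD a j 0), ← e1 (PySem.List.pyGetD b j 0)]
  simp only [Bool.or_eq_true, pv_contains_iff, hsa, hsb]
  exact or_assoc

lemma pv_stepA_eq (a b : List Int) (m : Nat) (j : Int) (hj0 : 0 ≤ j)
    (sa sb : PySem.Set Int) (best : Int)
    (hsa : ∀ v : Int, v ∈ sa ↔ ∃ k : Int, j + 2 ≤ k ∧ k < (m : Int) ∧ PySem.List.pyGetD a k 0 = v)
    (hsb : ∀ v : Int, v ∈ sb ↔ ∃ k : Int, j + 2 ≤ k ∧ k < (m : Int) ∧ PySem.List.pyGetD b k 0 = v) :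
    pvStepA a b (sa, sb, best) j =
      (sa.add (PySem.List.pyGetD a (j + 1) 0), sb.add (PySem.List.pyGetD b (j + 1) 0),
       pvStepB (m : Int) a b best j) := by
  exact congrArg
    (fun t => (sa.add (PySem.List.pyGetD a (j + 1) 0), sb.add (PySem.List.pyGetD b (j + 1) 0), t))
    (if_congr (pv_cond a b m j hj0 sa sb hsa hsb) rfl rfl)

-- propagating the "seen = all values at columns ≥ t" invariant through one Set.add
lemma pv_inv_step (c : List Int) (m : Nat) (T E U : Int) (s : PySem.Set Int)
    (hTE : T = E + 1) (hUE : U = E) (hm : E ≤ (m : Int) - 1)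
    (hs : ∀ v : Int, v ∈ s ↔ ∃ k : Int, T ≤ k ∧ k < (m : Int) ∧ PySem.List.pyGetD c k 0 = v) :
    ∀ v : Int, v ∈ s.add (PySem.List.pyGetD c E 0) ↔
      ∃ k : Int, U ≤ k ∧ k < (m : Int) ∧ PySem.List.pyGetD c k 0 = v := by
  intro v
  rw [PySem.Set.mem_add, hs v]
  constructor
  · rintro (⟨k, h1, h2, h3⟩ | hv)
    · exact ⟨k, by omega, h2, h3⟩
    · exact ⟨E, by omega, by omega, hv.symm⟩
  · rintro ⟨k, h1, h2, h3⟩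
    by_cases hk : k = E
    · right; rw [← hk]; exact h3.symm
    · left; exact ⟨k, by omega, h2, h3⟩

-- A's backward seen-set loop computes the same running max as pvStepB
lemma pv_back (a b : List Int) (m : Nat) :
    ∀ (j : Nat) (sa sb : PySem.Set Int) (best : Int),
      (j : Int) ≤ (m : Int) - 2 →
      (∀ v : Int, v ∈ sa ↔ ∃ k : Int, (j : Int) + 2 ≤ k ∧ k < (m : Int) ∧ PySem.List.pyGetD a k 0 = v) →
      (∀ v : Int, v ∈ sb ↔ ∃ k : Int, (j : Int) + 2 ≤ k ∧ k < (m : Int) ∧ PySem.List.pyGetD b k 0 = v) →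
      ((PySem.List.pyRange (j : Int) (-1) (-1)).foldl (pvStepA a b) (sa, sb, best)).2.2
        = (PySem.List.pyRange (j : Int) (-1) (-1)).foldl (pvStepB (m : Int) a b) best := by
  intro j
  induction j with
  | zero =>
    intro sa sb best hj hsa hsb
    push_cast at hj hsa hsb ⊢
    rw [PySem.List.pyRange_neg_one_cons (by norm_num : (-1 : Int) < 0)]
    rw [show (0 : Int) - 1 = -1 by ring, PySem.List.pyRange_neg_one_eq_nil (le_refl (-1 : Int))]
    simp only [List.foldl_cons, List.foldl_nil]
    rw [pv_stepA_eq a b m 0 (le_refl 0) sa sb best hsa hsb]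
  | succ i ih =>
    intro sa sb best hj hsa hsb
    push_cast at hj hsa hsb ⊢
    rw [PySem.List.pyRange_neg_one_cons (by omega : (-1 : Int) < (i : Int) + 1)]
    rw [show (i : Int) + 1 - 1 = (i : Int) by ring]
    simp only [List.foldl_cons]
    rw [pv_stepA_eq a b m ((i : Int) + 1) (by omega) sa sb best hsa hsb]
    exact ih _ _ _ (by omega)
      (pv_inv_step a m ((i : Int) + 1 + 2) ((i : Int) + 1 + 1) ((i : Int) + 2) sa
        (by ring) (by ring) (by omega) hsa)
      (pv_inv_step b m ((i : Int) + 1 + 2) ((i : Int) + 1 + 1) ((i : Int) + 2) sb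
        (by ring) (by ring) (by omega) hsb)

lemma pv_A_eq (n : Int) (a b : List Int) (hn : ¬ n = 0) :
    debug_solve_case n a b =
      max (pvB2 n a b)
        (((PySem.List.pyRange (n - 2) (-1) (-1)).foldl (pvStepA a b)
            (PySem.Set.empty, PySem.Set.empty, 0)).2.2) := by
  unfold debug_solve_case
  rw [if_neg hn]
  rfl

-- A reduced to three pvG scans, for positive n = m
lemma pv_A_G (a b : List Int) (m : Nat) (hm : 1 ≤ m) :
    debug_solve_case (m : Int) a b =
      max (max (pvG (fun i => PySem.List.pyGetD a i 0 = PySem.List.pyGetD b i 0) m)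
               (pvG (fun i => PySem.List.pyGetD a i 0 = PySem.List.pyGetD a (i + 1) 0 ∨
                              PySem.List.pyGetD b i 0 = PySem.List.pyGetD b (i + 1) 0) (m - 1)))
          (pvG (fun i => (pvMaxcol (m : Int) a b).getD (PySem.List.pyGetD a i 0) (-1) ≥ i + 2 ∨
                         (pvMaxcol (m : Int) a b).getD (PySem.List.pyGetD b i 0) (-1) ≥ i + 2) (m - 1)) := by
  rw [pv_A_eq (m : Int) a b (by omega)]
  have hB2 : pvB2 (m : Int) a b =
      max (pvG (fun i => PySem.List.pyGetD a i 0 = PySem.List.pyGetD b i 0) m)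
          (pvG (fun i => PySem.List.pyGetD a i 0 = PySem.List.pyGetD a (i + 1) 0 ∨
                         PySem.List.pyGetD b i 0 = PySem.List.pyGetD b (i + 1) 0) (m - 1)) := by
    unfold pvB2
    rw [pv_fold_G _ m 0 (le_refl 0)]
    rw [show ((m : Int) - 1) = ((m - 1 : Nat) : Int) by omega]
    rw [pv_fold_G _ (m - 1) _ (by
      have := pvG_nonneg (fun i => PySem.List.pyGetD a i 0 = PySem.List.pyGetD b i 0) m
      omega)]
    have h0 : max (0 : Int) (pvG (fun i => PySem.List.pyGetD a i 0 = PySem.List.pyGetD b i 0) m)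
        = pvG (fun i => PySem.List.pyGetD a i 0 = PySem.List.pyGetD b i 0) m := by
      have := pvG_nonneg (fun i => PySem.List.pyGetD a i 0 = PySem.List.pyGetD b i 0) m
      omega
    rw [h0]
  have hbw :
      ((PySem.List.pyRange ((m : Int) - 2) (-1) (-1)).foldl (pvStepA a b)
          (PySem.Set.empty, PySem.Set.empty, 0)).2.2
        = pvG (fun i => (pvMaxcol (m : Int) a b).getD (PySem.List.pyGetD a i 0) (-1) ≥ i + 2 ∨
                        (pvMaxcol (m : Int) a b).getD (PySem.List.pyGetD b i 0) (-1) ≥ i + 2) (m - 1) := by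
    by_cases h1 : m = 1
    · subst h1
      rw [show ((1 : Nat) : Int) - 2 = -1 by norm_num,
          PySem.List.pyRange_neg_one_eq_nil (le_refl (-1 : Int))]
      rfl
    · have hback := pv_back a b m (m - 2) PySem.Set.empty PySem.Set.empty 0
        (by omega)
        (by
          intro v
          constructor
          · intro hv; exact absurd hv (by simp [PySem.Set.empty])
          · rintro ⟨k, hk1, hk2, -⟩; exfalso; omega)
        (by
          intro v
          constructor
          · intro hv; exact absurd hv (by simp [PySem.Set.empty])
          · rintro ⟨k, hk1, hk2, -⟩; exfalso; omega)
      rw [show (((m - 2 : Nat)) : Int) = (m : Int) - 2 by omega] at hback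
      rw [hback, PySem.List.pyRange_neg_one_eq_reverse]
      rw [show (-1 : Int) + 1 = 0 by ring, show (m : Int) - 2 + 1 = (m : Int) - 1 by ring]
      rw [pv_foldl_reverse (pvStepB (m : Int) a b) (pv_stepB_comm (m : Int) a b)]
      rw [show ((m : Int) - 1) = ((m - 1 : Nat) : Int) by omega]
      have hfold := pv_fold_G (fun i => (pvMaxcol (m : Int) a b).getD (PySem.List.pyGetD a i 0) (-1) ≥ i + 2 ∨
                        (pvMaxcol (m : Int) a b).getD (PySem.List.pyGetD b i 0) (-1) ≥ i + 2)
        (m - 1) 0 (le_refl 0)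
      rw [show (PySem.List.pyRange 0 ((m - 1 : Nat) : Int) 1).foldl (pvStepB (m : Int) a b) 0
            = (PySem.List.pyRange 0 ((m - 1 : Nat) : Int) 1).foldl
                (fun best i => if ((pvMaxcol (m : Int) a b).getD (PySem.List.pyGetD a i 0) (-1) ≥ i + 2 ∨
                    (pvMaxcol (m : Int) a b).getD (PySem.List.pyGetD b i 0) (-1) ≥ i + 2)
                  then max best (i + 1) else best) 0 from rfl]
      rw [hfold]
      have := pvG_nonneg (fun i => (pvMaxcol (m : Int) a b).getD (PySem.List.pyGetD a i 0) (-1) ≥ i + 2 ∨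
                        (pvMaxcol (m : Int) a b).getD (PySem.List.pyGetD b i 0) (-1) ≥ i + 2) (m - 1)
      omega
  rw [hB2, hbw]

-- B reduced to one pvG scan of the combined condition
lemma pv_B_G (a b : List Int) (m : Nat) :
    debug_solve_case_alt (m : Int) a b =
      pvG (fun i =>
        (decide (PySem.List.pyGetD a i 0 = PySem.List.pyGetD b i 0) ||
         (decide (i + 1 < (m : Int)) &&
           (decide (PySem.List.pyGetD a i 0 = PySem.List.pyGetD a (i + 1) 0) ||
            decide (PySem.List.pyGetD b i 0 = PySem.List.pyGetD b (i + 1) 0))) ||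
         (decide ((pvMaxcol (m : Int) a b).getD (PySem.List.pyGetD a i 0) (-1) ≥ i + 2) ||
          decide ((pvMaxcol (m : Int) a b).getD (PySem.List.pyGetD b i 0) (-1) ≥ i + 2))) = true) m := by
  exact pv_find_G _ m

-- ===== VERDICT (by name: the statement is the Claim_ definition above) =====
theorem debug_solve_case_spec : Claim_equal_debug_solve_case := by
  intro n a b _dom _pre
  unfold Spec_debug_solve_case
  by_cases hn : n ≤ 0
  · -- both programs return 0
    have hB : debug_solve_case_alt n a b = 0 := by
      unfold debug_solve_case_alt
      rw [PySem.List.pyRange_neg_one_eq_nil (by omega : n - 1 ≤ -1)]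
      rfl
    rw [hB]
    by_cases h0 : n = 0
    · subst h0; rfl
    · rw [pv_A_eq n a b h0]
      rw [PySem.List.pyRange_neg_one_eq_nil (by omega : n - 2 ≤ -1)]
      unfold pvB2
      rw [PySem.List.pyRange_one_eq_nil (by omega : n - 1 ≤ 0),
          PySem.List.pyRange_one_eq_nil (by omega : n ≤ 0)]
      rfl
  · obtain ⟨m, rfl⟩ : ∃ m : Nat, n = (m : Int) :=
      ⟨n.toNat, (Int.toNat_of_nonneg (by omega)).symm⟩
    have hm : 1 ≤ m := by omega
    -- the guarded middle scan over m equals the unguarded scan over m - 1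
    have hmid : pvG (fun i => (i + 1 < (m : Int)) ∧
          (PySem.List.pyGetD a i 0 = PySem.List.pyGetD a (i + 1) 0 ∨
           PySem.List.pyGetD b i 0 = PySem.List.pyGetD b (i + 1) 0)) m
        = pvG (fun i => PySem.List.pyGetD a i 0 = PySem.List.pyGetD a (i + 1) 0 ∨
           PySem.List.pyGetD b i 0 = PySem.List.pyGetD b (i + 1) 0) (m - 1) := by
      obtain ⟨k, rfl⟩ : ∃ k : Nat, m = k + 1 := ⟨m - 1, by omega⟩
      simp only [pvG, Nat.add_sub_cancel]
      rw [if_neg (by push_cast; omega)]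
      exact pvG_congr _ _ k (by
        intro i hik
        constructor
        · rintro ⟨-, h⟩; exact h
        · intro h; exact ⟨by push_cast; omega, h⟩)
    -- the deletion scan never fires at column m - 1 (no strictly later column exists)
    have hq : pvG (fun i => (pvMaxcol (m : Int) a b).getD (PySem.List.pyGetD a i 0) (-1) ≥ i + 2 ∨
          (pvMaxcol (m : Int) a b).getD (PySem.List.pyGetD b i 0) (-1) ≥ i + 2) m
        = pvG (fun i => (pvMaxcol (m : Int) a b).getD (PySem.List.pyGetD a i 0) (-1) ≥ i + 2 ∨
          (pvMaxcol (m : Int) a b).getD (PySem.List.pyGetD b i 0) (-1) ≥ i + 2) (m - 1) := by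
      obtain ⟨k, rfl⟩ : ∃ k : Nat, m = k + 1 := ⟨m - 1, by omega⟩
      simp only [pvG, Nat.add_sub_cancel]
      rw [if_neg (by
        rintro (h | h) <;>
        · rw [pv_mc a b (k + 1) _ _ (by omega)] at h
          obtain ⟨j, hj1, hj2, -⟩ := h
          push_cast at hj1 hj2
          omega)]
    -- split B's combined boolean condition into the three Prop disjuncts
    have hBsplit : pvG (fun i =>
        (decide (PySem.List.pyGetD a i 0 = PySem.List.pyGetD b i 0) ||
         (decide (i + 1 < (m : Int)) &&
           (decide (PySem.List.pyGetD a i 0 = PySem.List.pyGetD a (i + 1) 0) ||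
            decide (PySem.List.pyGetD b i 0 = PySem.List.pyGetD b (i + 1) 0))) ||
         (decide ((pvMaxcol (m : Int) a b).getD (PySem.List.pyGetD a i 0) (-1) ≥ i + 2) ||
          decide ((pvMaxcol (m : Int) a b).getD (PySem.List.pyGetD b i 0) (-1) ≥ i + 2))) = true) m
        = max (max (pvG (fun i => PySem.List.pyGetD a i 0 = PySem.List.pyGetD b i 0) m)
                   (pvG (fun i => PySem.List.pyGetD a i 0 = PySem.List.pyGetD a (i + 1) 0 ∨
                                  PySem.List.pyGetD b i 0 = PySem.List.pyGetD b (i + 1) 0) (m - 1)))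
              (pvG (fun i => (pvMaxcol (m : Int) a b).getD (PySem.List.pyGetD a i 0) (-1) ≥ i + 2 ∨
                             (pvMaxcol (m : Int) a b).getD (PySem.List.pyGetD b i 0) (-1) ≥ i + 2) (m - 1)) := by
      rw [pvG_congr _ (fun i =>
          ((PySem.List.pyGetD a i 0 = PySem.List.pyGetD b i 0) ∨
            ((i + 1 < (m : Int)) ∧ (PySem.List.pyGetD a i 0 = PySem.List.pyGetD a (i + 1) 0 ∨
              PySem.List.pyGetD b i 0 = PySem.List.pyGetD b (i + 1) 0))) ∨
          ((pvMaxcol (m : Int) a b).getD (PySem.List.pyGetD a i 0) (-1) ≥ i + 2 ∨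
           (pvMaxcol (m : Int) a b).getD (PySem.List.pyGetD b i 0) (-1) ≥ i + 2)) m
        (by
          intro i _
          simp only [Bool.or_eq_true, Bool.and_eq_true, decide_eq_true_eq])]
      rw [pvG_or (fun i =>
          (PySem.List.pyGetD a i 0 = PySem.List.pyGetD b i 0) ∨
            ((i + 1 < (m : Int)) ∧ (PySem.List.pyGetD a i 0 = PySem.List.pyGetD a (i + 1) 0 ∨
              PySem.List.pyGetD b i 0 = PySem.List.pyGetD b (i + 1) 0)))
        (fun i => (pvMaxcol (m : Int) a b).getD (PySem.List.pyGetD a i 0) (-1) ≥ i + 2 ∨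
           (pvMaxcol (m : Int) a b).getD (PySem.List.pyGetD b i 0) (-1) ≥ i + 2) m]
      rw [pvG_or (fun i => PySem.List.pyGetD a i 0 = PySem.List.pyGetD b i 0)
        (fun i => (i + 1 < (m : Int)) ∧ (PySem.List.pyGetD a i 0 = PySem.List.pyGetD a (i + 1) 0 ∨
              PySem.List.pyGetD b i 0 = PySem.List.pyGetD b (i + 1) 0)) m]
      rw [hmid, hq]
    rw [pv_A_G a b m hm, pv_B_G a b m, hBsplit]
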